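-- pv_equiv track=rewrite | github.com/the-carpnter/codewars | squad_number_generator.py | generate_number
-- ===== SOURCE A (Python) =====
-- from itertools import product
--
-- def generate_number(squad, n):
--     if n not in squad:
--         return n
--     k = [int(str(x)+str(y)) for x,y in product(range(1,10), repeat = 2) if x + y == n and int(str(x)+str(y)) not in squad]
--     try:
--         return min(k)
--     except ValueError:
--         return None
-- ===== SOURCE B (Python) =====
-- def generate_number(squad, n):
--     if n not in squad:
--         return n
--     # tens digit x must satisfy 1 <= x <= 9 and 1 <= n - x <= 9, i.e.
--     # max(1, n-9) <= x <= min(9, n-1); candidate 10*x + (n-x) = 9*x + n is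
--     # increasing in x, so the first free one is the minimum.
--     for x in range(max(1, n - 9), min(9, n - 1) + 1):
--         num = 9 * x + n
--         if num not in squad:
--             return num
--     return None
-- ===== Notes on version B (the rewrite author's own statement) =====
-- stated objective: alternative
-- what changed: Instead of enumerating all 81 digit pairs, string-concatenating them and filtering by digit sum before taking min() under try/except, B derives the feasible tens-digit interval max(1,n-9)..min(9,n-1) in closed form and constructs the at-most-9 candidates directly as 9*x+n (increasing, so the first free one is the minimum).
import Mathlib
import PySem

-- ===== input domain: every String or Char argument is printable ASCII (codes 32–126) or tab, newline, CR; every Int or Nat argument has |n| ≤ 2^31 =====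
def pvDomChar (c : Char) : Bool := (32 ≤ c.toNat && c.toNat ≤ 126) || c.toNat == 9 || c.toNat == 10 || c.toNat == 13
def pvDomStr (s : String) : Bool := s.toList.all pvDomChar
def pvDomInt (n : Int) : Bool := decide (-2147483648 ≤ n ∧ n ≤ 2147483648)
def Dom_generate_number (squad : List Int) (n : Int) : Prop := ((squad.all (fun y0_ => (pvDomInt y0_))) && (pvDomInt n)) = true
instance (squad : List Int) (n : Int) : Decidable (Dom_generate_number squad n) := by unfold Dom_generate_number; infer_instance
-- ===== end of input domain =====

-- B replaces the 81-pair product/string-concat/min()-with-except of A by a closed-form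
-- tens-digit interval whose at-most-9 candidates 9*x+n are built directly, first free one wins.

-- ===== PORT A =====
-- int(str(x)+str(y)); int() cannot fail on the digit strings produced here, .getD 0 is never taken
def pvConcat (x y : Int) : Int :=
  (PySem.Int.ofStr? (PySem.Int.toStr x ++ PySem.Int.toStr y)).getD 0

def generate_number (squad : List Int) (n : Int) : Option Int :=
  if !squad.contains n then some n
  else
    -- product(range(1,10), repeat=2)
    let pairs := (PySem.List.pyRange 1 10 1).flatMap
      (fun x => (PySem.List.pyRange 1 10 1).map (fun y => (x, y)))
    let k := pairs.filterMap (fun p =>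
      if p.1 + p.2 = n ∧ ¬ (pvConcat p.1 p.2) ∈ squad then some (pvConcat p.1 p.2) else none)
    -- min(k), with ValueError on the empty list caught and turned into None
    PySem.List.min? k (fun v => v)

-- ===== PORT B =====
def generate_number_alt (squad : List Int) (n : Int) : Option Int :=
  if !squad.contains n then some n
  else
    -- for x in range(max(1, n-9), min(9, n-1)+1): num = 9*x+n; first num not in squad
    ((PySem.List.pyRange (max 1 (n - 9)) (min 9 (n - 1) + 1) 1).find?
      (fun x => !squad.contains (9 * x + n))).map (fun x => 9 * x + n)

-- ===== PRECONDITION & SPEC =====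
def Spec_generate_number (squad : List Int) (n : Int) (out : Option Int) : Prop := out = generate_number_alt squad n
instance (squad : List Int) (n : Int) (out : Option Int) : Decidable (Spec_generate_number squad n out) := by unfold Spec_generate_number; infer_instance

-- ===== CLAIM (what is proved, stated in full; the proofs are below) =====
def Claim_equal_generate_number : Prop := ∀ (squad : List Int) (n : Int), Dom_generate_number squad n → Spec_generate_number squad n (generate_number squad n)

-- ===== LEMMAS AND PROOFS =====

theorem pvConcat_eq (x y : Int) (hx1 : 1 ≤ x) (hx9 : x ≤ 9) (hy1 : 1 ≤ y) (hy9 : y ≤ 9) :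
    pvConcat x y = 10 * x + y := by
  have h : ∀ u ∈ PySem.List.pyRange 1 10 1, ∀ v ∈ PySem.List.pyRange 1 10 1,
      pvConcat u v = 10 * u + v := by decide
  exact h x (by simp [PySem.List.mem_pyRange_one]; omega) y
    (by simp [PySem.List.mem_pyRange_one]; omega)

-- A's filterMap over digit pairs = (pairs with the right sum, turned into numbers) filtered by membership
theorem pv_filterMap_split (squad : List Int) (n : Int) (ps : List (Int × Int))
    (h : ∀ p ∈ ps, 1 ≤ p.1 ∧ p.1 ≤ 9 ∧ 1 ≤ p.2 ∧ p.2 ≤ 9) :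
    ps.filterMap (fun p =>
      if p.1 + p.2 = n ∧ ¬ (pvConcat p.1 p.2) ∈ squad then some (pvConcat p.1 p.2) else none)
    = ((ps.filter (fun p => p.1 + p.2 == n)).map (fun p => 10 * p.1 + p.2)).filter
        (fun c => !squad.contains c) := by
  induction ps with
  | nil => rfl
  | cons p t ih =>
    obtain ⟨hx1, hx9, hy1, hy9⟩ := h p (List.mem_cons_self)
    have hc := pvConcat_eq p.1 p.2 hx1 hx9 hy1 hy9
    have iht := ih (fun q hq => h q (List.mem_cons_of_mem _ hq))
    simp only [List.filterMap_cons, List.filter_cons, hc]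
    by_cases hsum : p.1 + p.2 = n
    · by_cases hmem : (10 * p.1 + p.2) ∈ squad
      · simp [hsum, hmem, iht]
      · simp [hsum, hmem, iht]
    · simp [hsum, iht]

-- the pairs with digit sum n are exactly (x, n-x) for x in the closed-form tens-digit range
theorem pv_sum_pairs (n : Int) :
    (((PySem.List.pyRange 1 10 1).flatMap
        (fun x => (PySem.List.pyRange 1 10 1).map (fun y => (x, y)))).filter
      (fun p => p.1 + p.2 == n))
    = (PySem.List.pyRange (max 1 (n - 9)) (min 9 (n - 1) + 1) 1).map (fun x => (x, n - x)) := by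
  by_cases h2 : 2 ≤ n ∧ n ≤ 18
  · obtain ⟨hl, hr⟩ := h2
    interval_cases n <;> decide
  · have hnil : PySem.List.pyRange (max 1 (n - 9)) (min 9 (n - 1) + 1) 1 = [] := by
      apply PySem.List.pyRange_one_eq_nil; omega
    rw [hnil, List.map_nil, List.filter_eq_nil_iff]
    intro p hp
    have hb : ∀ q ∈ (PySem.List.pyRange 1 10 1).flatMap
        (fun x => (PySem.List.pyRange 1 10 1).map (fun y => (x, y))),
        2 ≤ q.1 + q.2 ∧ q.1 + q.2 ≤ 18 := by decide
    have := hb p hp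
    simp only [beq_iff_eq]
    omega

theorem pv_find?_eq_head?_filter (q : Int → Bool) (l : List Int) :
    l.find? q = (l.filter q).head? := by
  induction l with
  | nil => rfl
  | cons a t ih =>
    by_cases hq : q a = true
    · rw [List.find?_cons_of_pos hq, List.filter_cons_of_pos hq]; rfl
    · have hq' : q a = false := by revert hq; cases q a <;> simp
      rw [List.find?_cons_of_neg (by simp [hq']), List.filter_cons_of_neg (by simp [hq']), ih]

theorem pv_foldl_min (t : List Int) (x : Int) (h : ∀ y ∈ t, x ≤ y) :
    t.foldl min x = x := by
  induction t generalizing x with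
  | nil => rfl
  | cons a t ih =>
    have hxa : min x a = x := min_eq_left (h a (List.mem_cons_self))
    simp only [List.foldl_cons, hxa]
    exact ih x (fun y hy => h y (List.mem_cons_of_mem _ hy))

theorem pv_min?_sorted (l : List Int) (h : l.Pairwise (· < ·)) :
    PySem.List.min? l (fun v => v) = l.head? := by
  cases l with
  | nil => rfl
  | cons x t =>
    rw [PySem.List.min?_id_cons]
    have := List.pairwise_cons.mp h
    simp [pv_foldl_min t x (fun y hy => le_of_lt (this.1 y hy))]

theorem generate_number_eq_alt (squad : List Int) (n : Int) :
    generate_number squad n = generate_number_alt squad n := by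
  unfold generate_number generate_number_alt
  by_cases hmem : squad.contains n = true
  · simp only [hmem, Bool.not_true, Bool.false_eq_true, if_false]
    have hps : ∀ p ∈ (PySem.List.pyRange 1 10 1).flatMap
        (fun x => (PySem.List.pyRange 1 10 1).map (fun y => (x, y))),
        1 ≤ p.1 ∧ p.1 ≤ 9 ∧ 1 ≤ p.2 ∧ p.2 ≤ 9 := by decide
    rw [pv_filterMap_split squad n _ hps, pv_sum_pairs n, List.map_map]
    have hfun : ((fun p : Int × Int => 10 * p.1 + p.2) ∘ fun x => (x, n - x))
        = fun x => 9 * x + n := by funext x; simp; ring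
    rw [hfun]
    rw [show (fun x : Int => !squad.contains (9 * x + n))
        = ((fun c => !squad.contains c) ∘ fun x => 9 * x + n) from rfl]
    rw [← List.find?_map, pv_find?_eq_head?_filter]
    apply pv_min?_sorted
    apply List.Pairwise.filter
    exact List.Pairwise.map (fun x => 9 * x + n) (fun a b hab => by simp only []; omega)
      (PySem.List.pairwise_lt_pyRange_one _ _)
  · have h' : n ∉ squad := by simpa using hmem
    simp [h']

-- ===== VERDICT (by name: the statement is the Claim_ definition above) =====
theorem generate_number_spec : Claim_equal_generate_number := by
  intro squad n _
  unfold Spec_generate_number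
  exact generate_number_eq_alt squad n
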